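-- pv_equiv track=rewrite | github.com/CDBiddulph/scaffold-learning | experiments/crosswords_20250711_195402/scaffolds/11-3/scaffold.py | get_down_pattern
-- ===== SOURCE A (Python) =====
-- def get_down_pattern(solution, row, col, length):
--     """Get the current pattern for a down clue"""
--     pattern = []
--     for i in range(length):
--         if row + i < len(solution):
--             cell = solution[row + i][col]
--             if cell == '' or cell == '.':
--                 pattern.append('_')
--             else:
--                 pattern.append(cell)
--         else:
--             pattern.append('_')
--     return ''.join(pattern)
-- ===== SOURCE B (Python) =====
-- def get_down_pattern(solution, row, col, length):
--     """Get the current pattern for a down clue"""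
--     window = solution[row:row + max(0, length)]
--     pad = ['_'] * (length - len(window))
--     return ''.join([('_' if r[col] in ('', '.') else r[col]) for r in window] + pad)
-- ===== Notes on version B (the rewrite author's own statement) =====
-- stated objective: simpler
-- what changed: A runs an index loop over range(length) with a per-index bounds branch on row+i; B has no indices at all: it slices the window of rows solution[row:row+max(0,length)] out of the grid, maps each row of that slice to its pattern character, and pads with '_' cells computed from the window's length.
-- outside the precondition, e.g. on get_down_pattern([['A'], ['B']], -1, 0, 2): A returns 'BA', B returns '__'
import Mathlib
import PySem

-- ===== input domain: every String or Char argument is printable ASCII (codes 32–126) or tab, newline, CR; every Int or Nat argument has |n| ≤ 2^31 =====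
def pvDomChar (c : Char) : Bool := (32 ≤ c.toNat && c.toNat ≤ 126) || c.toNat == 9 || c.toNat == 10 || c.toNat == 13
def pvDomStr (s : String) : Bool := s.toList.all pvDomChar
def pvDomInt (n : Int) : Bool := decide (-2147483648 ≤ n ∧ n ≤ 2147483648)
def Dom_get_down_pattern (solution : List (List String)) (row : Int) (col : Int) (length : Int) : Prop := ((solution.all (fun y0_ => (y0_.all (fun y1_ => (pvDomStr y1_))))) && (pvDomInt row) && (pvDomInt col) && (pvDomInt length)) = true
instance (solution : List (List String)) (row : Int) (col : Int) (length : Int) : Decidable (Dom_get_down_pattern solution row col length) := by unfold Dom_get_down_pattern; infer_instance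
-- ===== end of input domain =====

-- B replaces A's index loop (range(length) with a per-index bounds branch) by slicing the window of rows out of the
-- grid, mapping the rows of that slice directly, and padding from the window's length (objective: simpler).

-- ===== PORT A =====
def get_down_pattern (solution : List (List String)) (row : Int) (col : Int) (length : Int) : String :=
  let pattern : List String :=
    (PySem.List.pyRange 0 length 1).foldl (fun pattern i =>
      if row + i < (solution.length : Int) then
        let cell := PySem.List.pyGetD (PySem.List.pyGetD solution (row + i) []) col ""
        if cell = "" ∨ cell = "." then pattern ++ ["_"] else pattern ++ [cell]
      else pattern ++ ["_"]) []
  PySem.Str.join "" pattern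

-- ===== PORT B =====
def get_down_pattern_alt (solution : List (List String)) (row : Int) (col : Int) (length : Int) : String :=
  let window : List (List String) := PySem.List.slice solution (some row) (some (row + max 0 length))
  let pad : List String := PySem.List.pyRepeat ["_"] (length - (window.length : Int))
  PySem.Str.join ""
    ((window.map (fun r =>
        let c := PySem.List.pyGetD r col ""
        if c = "" ∨ c = "." then "_" else c)) ++ pad)

-- ===== PRECONDITION & SPEC =====
-- Pre_ excludes (a) the inputs where the Python A raises an IndexError (the column index out of range of an
-- accessed row), and (b) inputs with a negative row and positive length — outside the natural grid domain —
-- where A's value depends on Python's negative-index wraparound.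
def Pre_get_down_pattern (solution : List (List String)) (row : Int) (col : Int) (length : Int) : Prop :=
  (length ≤ 0 ∨ 0 ≤ row) ∧
  ∀ i ∈ PySem.List.pyRange 0 (max 0 (min length ((solution.length : Int) - row))) 1,
    PySem.Raise.InRange (PySem.List.pyGetD solution (row + i) []).length col
instance (solution : List (List String)) (row : Int) (col : Int) (length : Int) : Decidable (Pre_get_down_pattern solution row col length) := by unfold Pre_get_down_pattern; infer_instance

def pvWitness_get_down_pattern : List (List String) × Int × Int × Int := ([["A"], [""]], 0, 0, 3)

def Spec_get_down_pattern (solution : List (List String)) (row : Int) (col : Int) (length : Int) (out : String) : Prop := out = get_down_pattern_alt solution row col length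
instance (solution : List (List String)) (row : Int) (col : Int) (length : Int) (out : String) : Decidable (Spec_get_down_pattern solution row col length out) := by unfold Spec_get_down_pattern; infer_instance

-- ===== CLAIM (what is proved, stated in full; the proofs are below) =====
def Claim_equal_get_down_pattern : Prop := ∀ (solution : List (List String)) (row : Int) (col : Int) (length : Int), Dom_get_down_pattern solution row col length → Pre_get_down_pattern solution row col length → Spec_get_down_pattern solution row col length (get_down_pattern solution row col length)

-- ===== LEMMAS AND PROOFS =====

-- an index loop reading xs[r+i] for i < k is the map over the window (xs.drop r).take k, when the window fits
theorem map_pyGetD_range_eq_window {α β : Type} [Inhabited α] (xs : List α) (d : α) (f : α → β)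
    (rN kN : Nat) (h : kN = 0 ∨ rN + kN ≤ xs.length) :
    (List.range kN).map (fun (j : Nat) => f (PySem.List.pyGetD xs ((rN : Int) + (j : Int)) d)) =
      ((xs.drop rN).take kN).map f := by
  apply List.ext_getElem
  · simp; omega
  · intro j hj1 hj2
    simp only [List.length_map, List.length_range] at hj1
    have hin : rN + kN ≤ xs.length := by omega
    simp only [List.getElem_map, List.getElem_range, List.getElem_take, List.getElem_drop]
    congr 1
    have hcast : (rN : Int) + (j : Int) = ((rN + j : Nat) : Int) := by push_cast; ring
    rw [hcast, PySem.List.pyGetD_natCast]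
    rw [List.getD_eq_getElem _ _ (by omega)]

theorem get_down_pattern_eq_alt (solution : List (List String)) (row : Int) (col : Int) (length : Int)
    (hrow : length ≤ 0 ∨ 0 ≤ row) :
    get_down_pattern solution row col length = get_down_pattern_alt solution row col length := by
  simp only [get_down_pattern, get_down_pattern_alt]
  by_cases hlen : length ≤ 0
  · -- empty pattern on both sides
    have hmax : max 0 length = 0 := by omega
    have hwin : PySem.List.slice solution (some row) (some (row + max 0 length)) = [] := by
      rw [hmax, add_zero]
      apply List.eq_nil_of_length_eq_zero
      rw [PySem.List.length_slice, Nat.sub_self]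
    rw [PySem.List.pyRange_one_eq_nil hlen, hwin]
    simp only [List.foldl_nil, List.map_nil, List.length_nil, List.nil_append,
      PySem.List.pyRepeat_singleton, Nat.cast_zero, sub_zero, Int.toNat_of_nonpos hlen,
      List.replicate_zero]
  · have hr : 0 ≤ row := by omega
    have hmax : max 0 length = length := by omega
    rw [hmax]
    -- the in-bounds prefix length
    set kA : Int := max 0 (min length ((solution.length : Int) - row)) with hkA
    have hk1 : (0 : Int) ≤ kA := le_max_left _ _
    have hk2 : kA ≤ length := by omega
    -- A's fold = map over the first kA indices ++ padding
    rw [PySem.List.pyRange_one_append 0 kA length hk1 hk2, List.foldl_append]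
    rw [PySem.List.foldl_congr_mem
        (PySem.List.pyRange 0 kA 1) _
        (fun (pattern : List String) i =>
          pattern ++ [let c := PySem.List.pyGetD (PySem.List.pyGetD solution (row + i) []) col ""
                      if c = "" ∨ c = "." then "_" else c]) []
        (by
          intro acc i hi
          rw [PySem.List.mem_pyRange_one] at hi
          have hlt : row + i < (solution.length : Int) := by omega
          simp only [if_pos hlt]
          split <;> rfl)]
    rw [PySem.List.foldl_append_singleton_eq_map, List.nil_append]
    rw [PySem.List.foldl_congr_mem
        (PySem.List.pyRange kA length 1) _
        (fun (pattern : List String) (_ : Int) => pattern ++ ["_"]) _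
        (by
          intro acc i hi
          rw [PySem.List.mem_pyRange_one] at hi
          have hge : ¬ row + i < (solution.length : Int) := by omega
          simp only [if_neg hge])]
    rw [PySem.List.foldl_append_singleton_eq_map (f := fun (_ : Int) => ("_" : String))]
    -- B's window
    have hwin : PySem.List.slice solution (some row) (some (row + length)) =
        (solution.drop row.toNat).take length.toNat := by
      rw [PySem.List.slice_toNat (xs := solution) hr (by omega : (0 : Int) ≤ row + length)]
      congr 1
      omega
    rw [hwin]
    have hwinlen : ((solution.drop row.toNat).take length.toNat).length = kA.toNat := by
      simp only [List.length_take, List.length_drop]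
      omega
    -- take length of the dropped rows = take kA of them
    have htake : (solution.drop row.toNat).take length.toNat =
        (solution.drop row.toNat).take kA.toNat := by
      by_cases h : length ≤ (solution.length : Int) - row
      · have : kA = length := by omega
        rw [this]
      · rw [List.take_of_length_le (by simp; omega), List.take_of_length_le (by simp; omega)]
    -- the mapped prefix agrees
    have hmap :
        (PySem.List.pyRange 0 kA 1).map
            (fun i => let c := PySem.List.pyGetD (PySem.List.pyGetD solution (row + i) []) col ""
                      if c = "" ∨ c = "." then "_" else c) =
          ((solution.drop row.toNat).take kA.toNat).map
            (fun r => let c := PySem.List.pyGetD r col ""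
                      if c = "" ∨ c = "." then "_" else c) := by
      rw [PySem.List.pyRange_one 0 kA]
      have hk4 : (kA - 0).toNat = kA.toNat := by omega
      rw [hk4, List.map_map]
      have hstep : ((fun i => let c := PySem.List.pyGetD (PySem.List.pyGetD solution (row + i) []) col ""
                              if c = "" ∨ c = "." then "_" else c) ∘ (fun (k : Nat) => (0 : Int) + (k : Int))) =
          fun (j : Nat) => (fun r => let c := PySem.List.pyGetD r col ""
                                     if c = "" ∨ c = "." then "_" else c)
            (PySem.List.pyGetD solution ((row.toNat : Int) + (j : Int)) []) := by
        funext k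
        simp only [Function.comp]
        have hXY : row + ((0 : Int) + (k : Int)) = ((row.toNat : Int) + (k : Int)) := by omega
        rw [hXY]
      rw [hstep]
      exact map_pyGetD_range_eq_window solution []
        (fun r => let c := PySem.List.pyGetD r col ""
                  if c = "" ∨ c = "." then "_" else c) row.toNat kA.toNat (by omega)
    rw [htake, hmap]
    have hwinlen2 : ((solution.drop row.toNat).take kA.toNat).length = kA.toNat := by
      simp only [List.length_take, List.length_drop]
      omega
    rw [hwinlen2, PySem.List.pyRepeat_singleton]
    congr 2
    rw [List.map_const', PySem.List.length_pyRange_one]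
    congr 1
    omega

-- ===== VERDICT (by name: the statement is the Claim_ definition above) =====
theorem get_down_pattern_spec : Claim_equal_get_down_pattern := by
  intro solution row col length _ hpre
  unfold Spec_get_down_pattern
  exact get_down_pattern_eq_alt solution row col length hpre.1
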